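-- pv_equiv track=rewrite | github.com/treko90/tarsus | ref_validation_prep.py | mod_suffixes_for_seq
-- ===== SOURCE A (Python) =====
-- from itertools import product
--
-- def mod_suffixes_for_seq(seq: str) -> list[str]:
--     """
--     Return all Cys/Met modification suffixes for a peptide sequence.
--
--     Suffix format:
--       - 'M0C0'       : no oxidized M, no CAM C
--       - 'M3C1'       : Ox on M at pos 3, CAM on C at pos 1
--       - 'M3_7C1_5'   : Ox on M3 & M7, CAM on C1 & C5
--     """
--     # 0-based indices of M and C
--     m_positions = [i for i, aa in enumerate(seq) if aa == "M"]
--     c_positions = [i for i, aa in enumerate(seq) if aa == "C"]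
--
--     nM = len(m_positions)
--     nC = len(c_positions)
--
--     # No M, no C → single state M0C0
--     if nM == 0 and nC == 0:
--         return ["M0C0"]
--
--     suffixes: list[str] = []
--
--     for m_state in product([0, 1], repeat=nM):
--         for c_state in product([0, 1], repeat=nC):
--             # 1‑based positions of modified residues
--             ox_m_pos = [m_positions[i] + 1 for i, s in enumerate(m_state) if s]
--             cam_c_pos = [c_positions[i] + 1 for i, s in enumerate(c_state) if s]
--
--             if ox_m_pos:
--                 m_part = "M" + "_".join(str(p) for p in ox_m_pos)
--             else:
--                 m_part = "M0"
--
--             if cam_c_pos: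
--                 c_part = "C" + "_".join(str(p) for p in cam_c_pos)
--             else:
--                 c_part = "C0"
--
--             suffixes.append(f"{m_part}{c_part}")
--
--     return suffixes
-- ===== SOURCE B (Python) =====
-- def mod_suffixes_for_seq(seq: str) -> list[str]:
--     """Build the 2^nM M-part labels and the 2^nC C-part labels once, then
--     combine them with one cross product (m-major order)."""
--     def parts(letter: str, positions: list[int]) -> list[str]:
--         # subsets of 1-based positions, in product([0,1], repeat=n) order
--         # (first position = most significant bit)
--         subsets = [[]]
--         for p in reversed(positions):
--             subsets = subsets + [[p + 1] + s for s in subsets]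
--         return [letter + "_".join(map(str, s)) if s else letter + "0"
--                 for s in subsets]
--
--     m_parts = parts("M", [i for i, aa in enumerate(seq) if aa == "M"])
--     c_parts = parts("C", [i for i, aa in enumerate(seq) if aa == "C"])
--     return [m + c for m in m_parts for c in c_parts]
-- ===== Notes on version B (the rewrite author's own statement) =====
-- stated objective: alternative
-- what changed: B precomputes the 2^nM M-part labels and 2^nC C-part labels as two tables (built by a doubling fold over the positions) and then takes one cross product, instead of re-deriving both labels from 0/1 state tuples inside a nested product([0,1],...) loop; the empty-case guard disappears.
import Mathlib
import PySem

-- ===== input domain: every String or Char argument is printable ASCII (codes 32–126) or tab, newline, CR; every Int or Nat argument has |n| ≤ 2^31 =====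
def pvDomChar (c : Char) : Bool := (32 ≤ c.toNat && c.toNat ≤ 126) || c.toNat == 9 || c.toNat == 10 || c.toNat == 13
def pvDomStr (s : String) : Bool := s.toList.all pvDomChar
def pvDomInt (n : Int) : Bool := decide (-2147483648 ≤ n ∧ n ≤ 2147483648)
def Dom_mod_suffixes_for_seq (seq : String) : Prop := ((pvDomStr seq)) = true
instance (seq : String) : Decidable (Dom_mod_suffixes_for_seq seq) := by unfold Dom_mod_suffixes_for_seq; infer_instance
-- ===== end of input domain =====

-- B builds the M-part and C-part label tables once (doubling fold over positions) and
-- combines them by one cross product; A re-derives both labels inside a nested product loop.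

-- ===== PORT A =====
-- itertools.product([0,1], repeat=n), exact: first coordinate varies slowest
def pvProdBits : Nat → List (List Int)
  | 0 => [[]]
  | n + 1 => ([0, 1] : List Int).flatMap (fun b => (pvProdBits n).map (fun st => b :: st))

-- '[positions[i] + 1 for i, s in enumerate(state) if s]' ; the index i is always in
-- range (state has length = positions.length), so the pyGetD default is never taken
def pvSel (positions : List Int) (state : List Int) : List Int :=
  ((PySem.List.enumerate state 0).filter (fun z => z.2 != 0)).map
    (fun z => PySem.List.pyGetD positions z.1 0 + 1)

def mod_suffixes_for_seq (seq : String) : List String :=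
  let m_positions : List Int :=
    ((PySem.List.enumerate seq.toList 0).filter (fun z => z.2 == 'M')).map (fun z => z.1)
  let c_positions : List Int :=
    ((PySem.List.enumerate seq.toList 0).filter (fun z => z.2 == 'C')).map (fun z => z.1)
  let nM := m_positions.length
  let nC := c_positions.length
  if nM = 0 ∧ nC = 0 then ["M0C0"]
  else
    (pvProdBits nM).foldl (fun acc m_state =>
      (pvProdBits nC).foldl (fun acc2 c_state =>
        let ox_m_pos := pvSel m_positions m_state
        let cam_c_pos := pvSel c_positions c_state
        let m_part := if ox_m_pos = [] then "M0"
          else "M" ++ PySem.Str.join "_" (ox_m_pos.map PySem.Int.toStr)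
        let c_part := if cam_c_pos = [] then "C0"
          else "C" ++ PySem.Str.join "_" (cam_c_pos.map PySem.Int.toStr)
        acc2 ++ [m_part ++ c_part]) acc) []

-- ===== PORT B =====
-- 'subsets = subsets + [[p+1]+s for s in subsets]' over reversed(positions) = foldr
def pvSubsets (positions : List Int) : List (List Int) :=
  positions.foldr (fun p acc => acc ++ acc.map (fun s => (p + 1) :: s)) [[]]

def pvParts (letter : String) (positions : List Int) : List String :=
  (pvSubsets positions).map (fun s =>
    if s = [] then letter ++ "0"
    else letter ++ PySem.Str.join "_" (s.map PySem.Int.toStr))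

def mod_suffixes_for_seq_alt (seq : String) : List String :=
  let m_parts := pvParts "M"
    (((PySem.List.enumerate seq.toList 0).filter (fun z => z.2 == 'M')).map (fun z => z.1))
  let c_parts := pvParts "C"
    (((PySem.List.enumerate seq.toList 0).filter (fun z => z.2 == 'C')).map (fun z => z.1))
  m_parts.flatMap (fun m => c_parts.map (fun c => m ++ c))

-- ===== PRECONDITION & SPEC =====
def Spec_mod_suffixes_for_seq (seq : String) (out : List String) : Prop := out = mod_suffixes_for_seq_alt seq
instance (seq : String) (out : List String) : Decidable (Spec_mod_suffixes_for_seq seq out) := by unfold Spec_mod_suffixes_for_seq; infer_instance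

-- ===== CLAIM (what is proved, stated in full; the proofs are below) =====
def Claim_equal_mod_suffixes_for_seq : Prop := ∀ (seq : String), Dom_mod_suffixes_for_seq seq → Spec_mod_suffixes_for_seq seq (mod_suffixes_for_seq seq)

-- ===== LEMMAS AND PROOFS =====

-- shifting the enumerate start by one steps the indexed list down past its head
theorem pvSel_shift (p : Int) (rest : List Int) :
    ∀ (st : List Int) (s : Int), 0 ≤ s →
      ((PySem.List.enumerate st (s + 1)).filter (fun z => z.2 != 0)).map
          (fun z => PySem.List.pyGetD (p :: rest) z.1 0 + 1)
        = ((PySem.List.enumerate st s).filter (fun z => z.2 != 0)).map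
          (fun z => PySem.List.pyGetD rest z.1 0 + 1) := by
  intro st
  induction st with
  | nil => intro s hs; simp [PySem.List.enumerate_nil]
  | cons b tl ih =>
    intro s hs
    have hg : PySem.List.pyGetD (p :: rest) (s + 1) 0 = PySem.List.pyGetD rest s 0 := by
      obtain ⟨n, rfl⟩ := Int.eq_ofNat_of_zero_le hs
      have hc : (n : Int) + 1 = ((n + 1 : Nat) : Int) := by push_cast; ring
      rw [hc, PySem.List.pyGetD_natCast, PySem.List.pyGetD_natCast]
      simp
    have ih' := ih (s + 1) (by omega)
    by_cases hb : b = 0 <;>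
      simp [PySem.List.enumerate_cons, hb, hg, ih']

theorem pvSel_cons (p : Int) (rest : List Int) (b : Int) (st : List Int) :
    pvSel (p :: rest) (b :: st)
      = (if b = 0 then pvSel rest st else (p + 1) :: pvSel rest st) := by
  have h := pvSel_shift p rest st 0 (by omega)
  norm_num at h
  by_cases hb : b = 0 <;>
    simp [pvSel, PySem.List.enumerate_cons, hb, h, PySem.List.pyGetD_zero_cons]

theorem pvMap_sel (positions : List Int) :
    (pvProdBits positions.length).map (pvSel positions) = pvSubsets positions := by
  induction positions with
  | nil => simp [pvProdBits, pvSubsets, pvSel, PySem.List.enumerate_nil]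
  | cons p rest ih =>
    simp only [List.length_cons, pvProdBits, List.flatMap_cons, List.flatMap_nil,
      List.map_append, List.append_nil, List.map_map]
    have h0 : (pvProdBits rest.length).map (pvSel (p :: rest) ∘ fun st => 0 :: st)
        = (pvProdBits rest.length).map (pvSel rest) := by
      apply List.map_congr_left; intro st _; simp [Function.comp, pvSel_cons]
    have h1 : (pvProdBits rest.length).map (pvSel (p :: rest) ∘ fun st => 1 :: st)
        = ((pvProdBits rest.length).map (pvSel rest)).map (fun s => (p + 1) :: s) := by
      simp only [List.map_map]
      apply List.map_congr_left; intro st _; simp [Function.comp, pvSel_cons]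
    rw [h0, h1, ih]
    rfl

theorem mod_suffixes_for_seq_eq (seq : String) :
    mod_suffixes_for_seq seq = mod_suffixes_for_seq_alt seq := by
  unfold mod_suffixes_for_seq mod_suffixes_for_seq_alt
  set mP : List Int :=
    ((PySem.List.enumerate seq.toList 0).filter (fun z => z.2 == 'M')).map (fun z => z.1) with hmP
  set cP : List Int :=
    ((PySem.List.enumerate seq.toList 0).filter (fun z => z.2 == 'C')).map (fun z => z.1) with hcP
  by_cases h : mP.length = 0 ∧ cP.length = 0
  · have hm : mP = [] := List.length_eq_zero_iff.mp h.1
    have hc : cP = [] := List.length_eq_zero_iff.mp h.2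
    simp [hm, hc, pvParts, pvSubsets]
  · simp only [h, if_false]
    have inner : ∀ (mst : List Int) (acc : List String),
        (pvProdBits cP.length).foldl (fun acc2 cst =>
          acc2 ++ [(if pvSel mP mst = [] then "M0"
              else "M" ++ PySem.Str.join "_" ((pvSel mP mst).map PySem.Int.toStr)) ++
            (if pvSel cP cst = [] then "C0"
              else "C" ++ PySem.Str.join "_" ((pvSel cP cst).map PySem.Int.toStr))]) acc
        = acc ++ (pvProdBits cP.length).map (fun cst =>
            (if pvSel mP mst = [] then "M0"
              else "M" ++ PySem.Str.join "_" ((pvSel mP mst).map PySem.Int.toStr)) ++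
            (if pvSel cP cst = [] then "C0"
              else "C" ++ PySem.Str.join "_" ((pvSel cP cst).map PySem.Int.toStr))) := by
      intro mst acc
      exact PySem.List.foldl_append_singleton_eq_map _ _ _
    simp only [inner]
    rw [PySem.List.foldl_append_eq_flatMap]
    simp only [List.nil_append, pvParts, ← pvMap_sel, List.flatMap_map, List.map_map]
    apply List.flatMap_congr
    intro mst _
    apply List.map_congr_left
    intro cst _
    by_cases hm : pvSel mP mst = [] <;> by_cases hc : pvSel cP cst = [] <;>
      simp [Function.comp, hm, hc]

-- ===== VERDICT (by name: the statement is the Claim_ definition above) =====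
theorem mod_suffixes_for_seq_spec : Claim_equal_mod_suffixes_for_seq := by
  intro seq _
  exact mod_suffixes_for_seq_eq seq
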